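-- pv_equiv track=rewrite | github.com/yemaster/queshin-ng | utils/riichi/yaku_han.py | is_pure_double_sequence
-- ===== SOURCE A (Python) =====
-- def is_pure_double_sequence(pair_split, hu_num, settings):
--     meld_count = []
--     for meld in pair_split:
--         if len(meld) == 3:
--             if meld[0] != meld[1] and meld[1] != meld[2]:
--                 if meld in meld_count:
--                     return True
--                 meld_count.append(meld)
--     return False
-- ===== SOURCE B (Python) =====
-- def is_pure_double_sequence(pair_split, hu_num, settings):
--     runs = [tuple(m) for m in pair_split
--             if len(m) == 3 and m[0] != m[1] and m[1] != m[2]]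
--     return len(set(runs)) < len(runs)
-- ===== Notes on version B (the rewrite author's own statement) =====
-- stated objective: simpler
-- what changed: Instead of accumulating seen melds and testing membership with an early return, B filters the qualifying melds once and detects a duplicate purely arithmetically, by comparing the number of distinct qualifying melds (len(set)) with their total count.
import Mathlib
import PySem

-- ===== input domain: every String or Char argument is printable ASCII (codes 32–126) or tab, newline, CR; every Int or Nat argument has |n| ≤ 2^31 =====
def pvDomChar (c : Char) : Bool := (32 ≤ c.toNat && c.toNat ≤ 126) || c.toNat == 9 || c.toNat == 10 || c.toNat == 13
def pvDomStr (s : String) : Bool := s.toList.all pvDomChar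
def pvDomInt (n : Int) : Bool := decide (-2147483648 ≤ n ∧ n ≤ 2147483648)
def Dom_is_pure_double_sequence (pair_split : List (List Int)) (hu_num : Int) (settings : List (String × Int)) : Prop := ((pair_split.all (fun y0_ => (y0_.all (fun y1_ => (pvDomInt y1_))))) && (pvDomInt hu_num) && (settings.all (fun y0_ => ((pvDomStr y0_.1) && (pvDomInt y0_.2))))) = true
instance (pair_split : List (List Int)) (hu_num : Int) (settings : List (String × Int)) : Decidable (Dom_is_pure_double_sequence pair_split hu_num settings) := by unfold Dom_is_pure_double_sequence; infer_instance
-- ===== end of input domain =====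

-- B replaces A's accumulator list with its in-loop membership scan and early return by a single
-- filter pass plus a cardinality comparison (number of distinct qualifying melds < their count).

-- ===== PORT A =====
-- A's loop with its accumulator `meld_count` and early return (`true`).
def pvLoopA (acc : List (List Int)) : List (List Int) → Bool
  | [] => false
  | m :: rest =>
    if m.length = 3 then
      if PySem.List.pyGet? m 0 ≠ PySem.List.pyGet? m 1 ∧ PySem.List.pyGet? m 1 ≠ PySem.List.pyGet? m 2 then
        if m ∈ acc then true
        else pvLoopA (acc ++ [m]) rest
      else pvLoopA acc rest
    else pvLoopA acc rest

def is_pure_double_sequence (pair_split : List (List Int)) (hu_num : Int) (settings : List (String × Int)) : Bool :=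
  pvLoopA [] pair_split

-- ===== PORT B =====
-- Source B's `tuple(m)` only makes melds hashable; the elements stay `List Int` here.
def is_pure_double_sequence_alt (pair_split : List (List Int)) (hu_num : Int) (settings : List (String × Int)) : Bool :=
  let runs := pair_split.filter (fun m =>
    decide (m.length = 3 ∧ PySem.List.pyGet? m 0 ≠ PySem.List.pyGet? m 1 ∧ PySem.List.pyGet? m 1 ≠ PySem.List.pyGet? m 2))
  decide ((PySem.Set.ofList runs).length < runs.length)

-- ===== PRECONDITION & SPEC =====
def Spec_is_pure_double_sequence (pair_split : List (List Int)) (hu_num : Int) (settings : List (String × Int)) (out : Bool) : Prop := out = is_pure_double_sequence_alt pair_split hu_num settings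
instance (pair_split : List (List Int)) (hu_num : Int) (settings : List (String × Int)) (out : Bool) : Decidable (Spec_is_pure_double_sequence pair_split hu_num settings out) := by unfold Spec_is_pure_double_sequence; infer_instance

-- ===== CLAIM =====
def Claim_equal_is_pure_double_sequence : Prop := ∀ (pair_split : List (List Int)) (hu_num : Int) (settings : List (String × Int)), Dom_is_pure_double_sequence pair_split hu_num settings → Spec_is_pure_double_sequence pair_split hu_num settings (is_pure_double_sequence pair_split hu_num settings)

-- ===== LEMMAS AND PROOFS =====
-- the shared filter condition, as a Bool predicate
def pvPred (m : List Int) : Bool :=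
  decide (m.length = 3 ∧ PySem.List.pyGet? m 0 ≠ PySem.List.pyGet? m 1 ∧ PySem.List.pyGet? m 1 ≠ PySem.List.pyGet? m 2)

-- A's loop returns true iff the accumulator together with the qualifying melds contains a repeat
theorem pvLoopA_char (ls : List (List Int)) : ∀ acc : List (List Int), acc.Nodup →
    pvLoopA acc ls = decide (¬ (acc ++ ls.filter pvPred).Nodup) := by
  induction ls with
  | nil => intro acc h; simp [pvLoopA, h]
  | cons m rest ih =>
    intro acc h
    by_cases hp : (pvPred m) = true
    · have hp' := of_decide_eq_true hp
      obtain ⟨h3, h01, h12⟩ := hp'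
      have hfc : List.filter pvPred (m :: rest) = m :: List.filter pvPred rest := by
        simp [hp]
      by_cases hm : m ∈ acc
      · have hstep : pvLoopA acc (m :: rest) = true := by
          simp only [pvLoopA]
          rw [if_pos h3, if_pos ⟨h01, h12⟩, if_pos hm]
        rw [hstep, hfc]
        have hnot : ¬ (acc ++ m :: List.filter pvPred rest).Nodup := fun hn =>
          (List.disjoint_of_nodup_append hn hm (by simp)).elim
        exact (decide_eq_true hnot).symm
      · have hnd2 : (acc ++ [m]).Nodup := by
          simp [List.nodup_append, h]
          intro a ha heq
          exact hm (heq ▸ ha)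
        have hstep : pvLoopA acc (m :: rest) = pvLoopA (acc ++ [m]) rest := by
          simp only [pvLoopA]
          rw [if_pos h3, if_pos ⟨h01, h12⟩, if_neg hm]
        rw [hstep, ih _ hnd2, hfc, List.append_assoc]
        rfl
    · have hnp : ¬ (m.length = 3 ∧ PySem.List.pyGet? m 0 ≠ PySem.List.pyGet? m 1 ∧ PySem.List.pyGet? m 1 ≠ PySem.List.pyGet? m 2) := by
        simpa [pvPred] using hp
      have hfc : List.filter pvPred (m :: rest) = List.filter pvPred rest := by
        simp [hp]
      have hstep : pvLoopA acc (m :: rest) = pvLoopA acc rest := by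
        by_cases h3 : m.length = 3
        · have hne : ¬ (PySem.List.pyGet? m 0 ≠ PySem.List.pyGet? m 1 ∧ PySem.List.pyGet? m 1 ≠ PySem.List.pyGet? m 2) :=
            fun hc => hnp ⟨h3, hc⟩
          simp only [pvLoopA]
          rw [if_pos h3, if_neg hne]
        · simp only [pvLoopA]
          rw [if_neg h3]
      rw [hstep, ih _ h, hfc]

-- the cardinality test detects exactly a failure of Nodup
theorem pvCard_char {α : Type} [BEq α] [LawfulBEq α] (xs : List α) :
    ((PySem.Set.ofList xs).length < xs.length) ↔ ¬ xs.Nodup := by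
  constructor
  · intro hlt hnd
    rw [PySem.Set.ofList_eq_self_of_nodup xs hnd] at hlt
    omega
  · intro hnd
    have hle := PySem.Set.length_ofList_le xs
    rcases lt_or_eq_of_le hle with h | h
    · exact h
    · exfalso
      have hsub : (PySem.Set.ofList xs).Subperm xs :=
        List.subperm_of_subset (PySem.Set.nodup_ofList xs)
          (fun y hy => (PySem.Set.mem_ofList xs y).mp hy)
      have hperm : (PySem.Set.ofList xs).Perm xs := hsub.perm_of_length_le (le_of_eq h.symm)
      exact hnd (hperm.nodup_iff.mp (PySem.Set.nodup_ofList xs))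

-- ===== VERDICT =====
theorem is_pure_double_sequence_spec : Claim_equal_is_pure_double_sequence := by
  intro pair_split hu_num settings _
  unfold Spec_is_pure_double_sequence is_pure_double_sequence
  rw [pvLoopA_char pair_split [] List.nodup_nil, List.nil_append]
  have halt : is_pure_double_sequence_alt pair_split hu_num settings
      = decide ((PySem.Set.ofList (pair_split.filter pvPred)).length
          < (pair_split.filter pvPred).length) := rfl
  rw [halt, decide_eq_decide]
  exact (pvCard_char _).symm
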